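-- pv_equiv track=rewrite | github.com/gsauthof/pronto-ccf | ccf2pulse.py | format_seq
-- ===== SOURCE A (Python) =====
-- def format_seq(xs, indent, hex=True):
--     if not xs:
--         return ''
--     ss = [ ' ' * indent]
--     for i, x in enumerate(xs, 1):
--         if hex:
--             ss.append(f'{x:04x}')
--         else:
--             ss.append(f'{x:4d}')
--         if i % 6 == 0:
--             ss.append('\n' + ' ' * indent)
--             continue
--         ss.append(' ')
--         if i % 2 == 0:
--             ss.append(' ')
--     return ''.join(ss)
-- ===== SOURCE B (Python) =====
-- def format_seq(xs, indent, hex=True):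
--     if not xs:
--         return ''
--     rows = [xs[i:i+6] for i in range(0, len(xs), 6)]
--     out = [' ' * indent]
--     for row in rows:
--         for j, x in enumerate(row, 1):
--             out.append(f'{x:04x}' if hex else f'{x:4d}')
--             if j == 6:
--                 out.append('\n' + ' ' * indent)
--             elif j % 2 == 0:
--                 out.append('  ')
--             else:
--                 out.append(' ')
--     return ''.join(out)
-- ===== Notes on version B (the rewrite author's own statement) =====
-- stated objective: alternative
-- what changed: B first chunks the input into rows of six and drives the separator choice from the local row index (nested loops over rows), instead of A's single enumerate loop keyed on the global index modulo 6 and 2.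
import Mathlib
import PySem

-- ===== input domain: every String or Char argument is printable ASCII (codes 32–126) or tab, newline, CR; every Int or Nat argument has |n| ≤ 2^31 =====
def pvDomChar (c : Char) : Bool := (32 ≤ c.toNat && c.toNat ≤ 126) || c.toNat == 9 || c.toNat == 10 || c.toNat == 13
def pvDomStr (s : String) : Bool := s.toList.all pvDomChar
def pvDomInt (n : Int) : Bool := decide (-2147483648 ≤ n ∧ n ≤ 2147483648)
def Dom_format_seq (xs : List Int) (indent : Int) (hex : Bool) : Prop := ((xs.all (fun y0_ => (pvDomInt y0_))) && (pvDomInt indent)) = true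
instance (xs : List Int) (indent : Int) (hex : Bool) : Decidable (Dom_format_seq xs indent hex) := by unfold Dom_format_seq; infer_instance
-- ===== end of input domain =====

-- B formats the same sequence by chunking into rows of six and choosing separators
-- from the local row index; A uses one global-index loop with mod-6/mod-2 tests.

-- shared formatting helpers (exact f-string semantics)
-- ' ' * indent (empty for indent <= 0, like Python's str * int)
def pvSpaces (n : Int) : String := String.mk (PySem.List.pyRepeat [' '] n)

def pvHexDigit (n : Nat) : Char := if n < 10 then Char.ofNat (48 + n) else Char.ofNat (87 + n)

def pvNatHex (n : Nat) (acc : List Char) : List Char :=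
  if h : n < 16 then pvHexDigit n :: acc
  else pvNatHex (n / 16) (pvHexDigit (n % 16) :: acc)
termination_by n
decreasing_by exact Nat.div_lt_self (by omega) (by omega)

-- f'{x:04x}' : lowercase hex, zero-padded to width 4 with the sign in front = str.zfill
def pvFmt04x (x : Int) : String :=
  PySem.Str.zfill (String.mk ((if x < 0 then ['-'] else []) ++ pvNatHex x.natAbs [])) 4

-- f'{x:4d}' : str(x) right-justified with spaces to width 4
def pvFmt4d (x : Int) : String :=
  let s := PySem.Int.toStr x
  String.mk (List.replicate (4 - s.length) ' ') ++ s

-- ===== PORT A =====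
def format_seq (xs : List Int) (indent : Int) (hex : Bool) : String :=
  if xs = [] then ""
  else
    let step : (Nat × List String) → Int → (Nat × List String) := fun st x =>
      let i := st.1
      let ss := st.2 ++ [if hex then pvFmt04x x else pvFmt4d x]
      let ss :=
        if i % 6 = 0 then ss ++ ["\n" ++ pvSpaces indent]
        else
          let ss := ss ++ [" "]
          if i % 2 = 0 then ss ++ [" "] else ss
      (i + 1, ss)
    String.join (xs.foldl step (1, [pvSpaces indent])).2

-- ===== PORT B =====
def pvChunks6 (xs : List Int) : List (List Int) :=
  if xs = [] then [] else xs.take 6 :: pvChunks6 (xs.drop 6)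
termination_by xs.length
decreasing_by
  have : xs.length ≠ 0 := by simpa [List.length_eq_zero_iff] using ‹xs ≠ []›
  simp [List.length_drop]; omega

def pvRowStr (hex : Bool) (ind : String) (row : List Int) : String :=
  (row.foldl (fun (st : Nat × String) x =>
      (st.1 + 1,
       st.2 ++ (if hex then pvFmt04x x else pvFmt4d x) ++
         (if st.1 = 6 then "\n" ++ ind else if st.1 % 2 = 0 then "  " else " ")))
    (1, "")).2

def format_seq_alt (xs : List Int) (indent : Int) (hex : Bool) : String :=
  if xs = [] then ""
  else pvSpaces indent ++ String.join ((pvChunks6 xs).map (pvRowStr hex (pvSpaces indent)))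

-- ===== PRECONDITION & SPEC =====
def Spec_format_seq (xs : List Int) (indent : Int) (hex : Bool) (out : String) : Prop := out = format_seq_alt xs indent hex
instance (xs : List Int) (indent : Int) (hex : Bool) (out : String) : Decidable (Spec_format_seq xs indent hex out) := by unfold Spec_format_seq; infer_instance

-- ===== CLAIM (what is proved, stated in full; the proofs are below) =====
def Claim_equal_format_seq : Prop := ∀ (xs : List Int) (indent : Int) (hex : Bool), Dom_format_seq xs indent hex → Spec_format_seq xs indent hex (format_seq xs indent hex)

-- ===== LEMMAS AND PROOFS =====

def pvFmt (hex : Bool) (x : Int) : String := if hex then pvFmt04x x else pvFmt4d x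

-- common specification: output from global index i onward
def pvSep (ind : String) (i : Nat) : String :=
  if i % 6 = 0 then "\n" ++ ind else if i % 2 = 0 then "  " else " "

def pvGo (hex : Bool) (ind : String) (i : Nat) : List Int → String
  | [] => ""
  | x :: t => pvFmt hex x ++ pvSep ind i ++ pvGo hex ind (i + 1) t

lemma foldl_join (l : List String) : ∀ s : String, l.foldl (· ++ ·) s = s ++ String.join l := by
  induction l with
  | nil => intro s; simp [String.join]
  | cons h t ih =>
    intro s
    show List.foldl (· ++ ·) (s ++ h) t = s ++ String.join (h :: t)
    rw [ih (s ++ h)]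
    have hj : String.join (h :: t) = h ++ String.join t := by
      show List.foldl (· ++ ·) ("" ++ h) t = _
      rw [ih ("" ++ h)]; simp
    rw [hj, String.append_assoc]

lemma join_append (l1 l2 : List String) :
    String.join (l1 ++ l2) = String.join l1 ++ String.join l2 := by
  show (l1 ++ l2).foldl (· ++ ·) "" = _
  rw [List.foldl_append, foldl_join]
  rfl

lemma join_cons (a : String) (l : List String) :
    String.join (a :: l) = a ++ String.join l := by
  show List.foldl (· ++ ·) ("" ++ a) l = _
  rw [foldl_join]; simp

lemma sep_shift (ind : String) (m j : Nat) (h1 : 1 ≤ j) (h6 : j ≤ 6) :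
    pvSep ind (6 * m + j) = pvSep ind j := by
  unfold pvSep
  have e1 : (6 * m + j) % 6 = j % 6 := by omega
  have e2 : (6 * m + j) % 2 = j % 2 := by omega
  rw [e1, e2]

lemma foldA (hex : Bool) (indent : Int) (xs : List Int) :
    ∀ (i : Nat) (ss : List String),
      String.join ((xs.foldl (fun (st : Nat × List String) x =>
        let i := st.1
        let ss := st.2 ++ [if hex then pvFmt04x x else pvFmt4d x]
        let ss :=
          if i % 6 = 0 then ss ++ ["\n" ++ pvSpaces indent]
          else
            let ss := ss ++ [" "]
            if i % 2 = 0 then ss ++ [" "] else ss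
        (i + 1, ss)) (i, ss)).2) = String.join ss ++ pvGo hex (pvSpaces indent) i xs := by
  induction xs with
  | nil => intro i ss; simp [pvGo]
  | cons x t ih =>
    intro i ss
    simp only [List.foldl_cons]
    by_cases h6 : i % 6 = 0
    · rw [ih]
      simp [h6, pvGo, pvSep, pvFmt, join_append, String.join, String.append_assoc]
    · by_cases h2 : i % 2 = 0 <;>
      · rw [ih]
        simp [h6, h2, pvGo, pvSep, pvFmt, join_append, String.join, String.append_assoc]

theorem chunks_eq (hex : Bool) (ind : String) (xs : List Int) (m : Nat) :
    String.join ((pvChunks6 xs).map (pvRowStr hex ind)) = pvGo hex ind (6 * m + 1) xs := by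
  have s1 := sep_shift ind m 1 (by omega) (by omega)
  have s2 := sep_shift ind m 2 (by omega) (by omega)
  have s3 := sep_shift ind m 3 (by omega) (by omega)
  have s4 := sep_shift ind m 4 (by omega) (by omega)
  have s5 := sep_shift ind m 5 (by omega) (by omega)
  have s6 := sep_shift ind m 6 (by omega) (by omega)
  rcases xs with _ | ⟨a, _ | ⟨b, _ | ⟨c, _ | ⟨d, _ | ⟨e, _ | ⟨f, rest⟩⟩⟩⟩⟩⟩
  · rw [pvChunks6]; simp [pvGo, String.join]
  · rw [pvChunks6]
    simp only [pvGo]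
    rw [s1]
    simp [pvChunks6, pvRowStr, pvGo, pvSep, pvFmt, join_cons, String.join]
  · rw [pvChunks6]
    simp only [pvGo]
    have e2 : 6 * m + 1 + 1 = 6 * m + 2 := by omega
    rw [e2, s1, s2]
    simp [pvChunks6, pvRowStr, pvGo, pvSep, pvFmt, join_cons, String.join, String.append_assoc]
  · rw [pvChunks6]
    simp only [pvGo]
    have e2 : 6 * m + 1 + 1 = 6 * m + 2 := by omega
    have e3 : 6 * m + 2 + 1 = 6 * m + 3 := by omega
    rw [e2, e3, s1, s2, s3]
    simp [pvChunks6, pvRowStr, pvGo, pvSep, pvFmt, join_cons, String.join, String.append_assoc]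
  · rw [pvChunks6]
    simp only [pvGo]
    have e2 : 6 * m + 1 + 1 = 6 * m + 2 := by omega
    have e3 : 6 * m + 2 + 1 = 6 * m + 3 := by omega
    have e4 : 6 * m + 3 + 1 = 6 * m + 4 := by omega
    rw [e2, e3, e4, s1, s2, s3, s4]
    simp [pvChunks6, pvRowStr, pvGo, pvSep, pvFmt, join_cons, String.join, String.append_assoc]
  · rw [pvChunks6]
    simp only [pvGo]
    have e2 : 6 * m + 1 + 1 = 6 * m + 2 := by omega
    have e3 : 6 * m + 2 + 1 = 6 * m + 3 := by omega
    have e4 : 6 * m + 3 + 1 = 6 * m + 4 := by omega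
    have e5 : 6 * m + 4 + 1 = 6 * m + 5 := by omega
    rw [e2, e3, e4, e5, s1, s2, s3, s4, s5]
    simp [pvChunks6, pvRowStr, pvGo, pvSep, pvFmt, join_cons, String.join, String.append_assoc]
  · rw [pvChunks6]
    simp only [pvGo]
    have e2 : 6 * m + 1 + 1 = 6 * m + 2 := by omega
    have e3 : 6 * m + 2 + 1 = 6 * m + 3 := by omega
    have e4 : 6 * m + 3 + 1 = 6 * m + 4 := by omega
    have e5 : 6 * m + 4 + 1 = 6 * m + 5 := by omega
    have e6 : 6 * m + 5 + 1 = 6 * m + 6 := by omega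
    have e7 : 6 * m + 6 + 1 = 6 * (m + 1) + 1 := by omega
    rw [e2, e3, e4, e5, e6, e7, s1, s2, s3, s4, s5, s6]
    rw [if_neg (by simp : ¬ (a :: b :: c :: d :: e :: f :: rest = []))]
    simp only [List.take_succ_cons, List.take_zero, List.drop_succ_cons, List.drop_zero,
      List.map_cons, join_cons]
    rw [chunks_eq hex ind rest (m + 1)]
    simp [pvRowStr, pvSep, pvFmt, join_cons, String.append_assoc]
termination_by xs.length
decreasing_by simp; omega

-- ===== VERDICT (by name: the statement is the Claim_ definition above) =====
theorem format_seq_spec : Claim_equal_format_seq := by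
  intro xs indent hex _
  unfold Spec_format_seq format_seq format_seq_alt
  by_cases h : xs = []
  · simp [h]
  · simp only [h, if_neg]
    rw [foldA, chunks_eq hex (pvSpaces indent) xs 0]
    simp [String.join]
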